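-- pv_equiv track=rewrite | github.com/pypi-data/pypi-mirror-39 | packages/AIJIdevtools/AIJIdevtools-1.4.3-py3-none-any.whl/devtools/listools.py | dict_ordered
-- ===== SOURCE A (Python) =====
-- def dict_ordered(ls, sep='\n', line_prefix=''):
--     ls = sorted(ls)
--     pre = ls[0][0]
--     res = line_prefix + repr(ls[0]) + ','
--     for s in ls[1:]:
--         if s[0] == pre:
--             res += ' ' + repr(s) + ','
--         else:
--             res += sep + line_prefix + repr(s) + ','
--         pre = s[0]
--     return res
-- ===== SOURCE B (Python) =====
-- def dict_ordered(ls, sep='\n', line_prefix=''):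
--     groups = {}
--     for k, v in ls:
--         groups.setdefault(k, []).append(v)
--     lines = [line_prefix + ' '.join(repr((k, v)) + ',' for v in sorted(groups[k]))
--              for k in sorted(groups)]
--     return sep.join(lines)
-- ===== Notes on version B (the rewrite author's own statement) =====
-- stated objective: alternative
-- what changed: Replaces A's full lexicographic sort plus a stateful previous-key scan with string concatenation by hash-grouping the values per key into a dict, then sorting the keys and each key's value list independently and joining the rendered lines.
import Mathlib
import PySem

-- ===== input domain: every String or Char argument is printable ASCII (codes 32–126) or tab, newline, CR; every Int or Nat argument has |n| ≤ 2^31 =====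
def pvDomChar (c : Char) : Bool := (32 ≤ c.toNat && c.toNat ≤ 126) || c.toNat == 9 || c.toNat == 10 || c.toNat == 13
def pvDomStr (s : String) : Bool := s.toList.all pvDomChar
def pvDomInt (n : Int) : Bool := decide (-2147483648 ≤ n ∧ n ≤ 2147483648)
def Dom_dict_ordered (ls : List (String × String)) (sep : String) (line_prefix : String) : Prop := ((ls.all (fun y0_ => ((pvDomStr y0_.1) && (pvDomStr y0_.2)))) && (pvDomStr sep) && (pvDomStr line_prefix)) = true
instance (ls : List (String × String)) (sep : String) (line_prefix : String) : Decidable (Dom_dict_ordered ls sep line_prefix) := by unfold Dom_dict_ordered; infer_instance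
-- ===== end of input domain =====

-- B replaces A's full lexicographic sort + stateful previous-key scan by hash-grouping the
-- values per key into a dict, then sorting keys and each key's values independently
-- (objective: alternative). On empty input A raises IndexError (excluded by Pre_, B returns '').

-- Python repr of one Char of the domain (printable ASCII / tab / newline / CR), given the quote char q
def pyEscChar (q : Char) (c : Char) : List Char :=
  if c == '\\' then ['\\', '\\']
  else if c == '\t' then ['\\', 't']
  else if c == '\n' then ['\\', 'n']
  else if c == '\r' then ['\\', 'r']
  else if c == q then ['\\', q]
  else [c]

-- Python repr of a string (exact on the stated printable-ASCII + tab/newline/CR domain):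
-- single quotes unless the string contains ' and not "
def pyReprChars (cs : List Char) : List Char :=
  let q : Char := if '\'' ∈ cs ∧ ¬ ('"' ∈ cs) then '"' else '\''
  q :: cs.flatMap (pyEscChar q) ++ [q]

-- Python repr of a 2-tuple of strings: "('…', '…')"
def pyReprPair (p : String × String) : List Char :=
  '(' :: pyReprChars p.1.toList ++ [',', ' '] ++ pyReprChars p.2.toList ++ [')']

-- ===== PORT A =====
-- the loop body of A: state = (pre, res)
def dictOrderedStep (sepL lpL : List Char) (st : String × List Char) (s : String × String) : String × List Char :=
  if s.1 == st.1 then (s.1, st.2 ++ ' ' :: pyReprPair s ++ [','])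
  else (s.1, st.2 ++ sepL ++ lpL ++ pyReprPair s ++ [','])

def dict_ordered (ls : List (String × String)) (sep : String) (line_prefix : String) : String :=
  match PySem.List.sorted2 ls Prod.fst Prod.snd with
  | [] => ""   -- IndexError in Python: excluded by Pre_
  | x :: rest =>
    String.mk (rest.foldl (dictOrderedStep sep.toList line_prefix.toList)
      (x.1, line_prefix.toList ++ pyReprPair x ++ [','])).2

-- ===== PORT B =====
-- groups.setdefault(k, []).append(v) over ls: a dict from key to its values, in encounter order
def groupVals (ls : List (String × String)) : PySem.Dict String (List String) :=
  ls.foldl (fun d p => d.insert p.1 (d.getD p.1 [] ++ [p.2])) PySem.Dict.empty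

-- Python's sep.join
def joinL (sep : List Char) : List (List Char) → List Char
  | [] => []
  | [p] => p
  | p :: q :: ps => p ++ sep ++ joinL sep (q :: ps)

-- one line: line_prefix + ' '.join(repr((k, v)) + ',' for v in vs)
def lineB (lpL : List Char) (k : String) (vs : List String) : List Char :=
  lpL ++ joinL [' '] (vs.map (fun v => pyReprPair (k, v) ++ [',']))

def dict_ordered_alt (ls : List (String × String)) (sep : String) (line_prefix : String) : String :=
  String.mk (joinL sep.toList
    ((PySem.List.sorted (groupVals ls).keys (fun k => k)).map
      (fun k => lineB line_prefix.toList k (PySem.List.sorted ((groupVals ls).getD k []) (fun v => v)))))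

-- ===== PRECONDITION & SPEC =====
-- Pre_ excludes only the empty list, on which A raises IndexError (ls[0]).
def Pre_dict_ordered (ls : List (String × String)) (sep : String) (line_prefix : String) : Prop := ls ≠ []
instance (ls : List (String × String)) (sep : String) (line_prefix : String) : Decidable (Pre_dict_ordered ls sep line_prefix) := by unfold Pre_dict_ordered; infer_instance

def pvWitness_dict_ordered : (List (String × String)) × String × String :=
  ([("b", "2"), ("a", "1"), ("b", "1")], "\n", "- ")

def Spec_dict_ordered (ls : List (String × String)) (sep : String) (line_prefix : String) (out : String) : Prop := out = dict_ordered_alt ls sep line_prefix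
instance (ls : List (String × String)) (sep : String) (line_prefix : String) (out : String) : Decidable (Spec_dict_ordered ls sep line_prefix out) := by unfold Spec_dict_ordered; infer_instance

-- ===== CLAIM (what is proved, stated in full; the proofs are below) =====
def Claim_equal_dict_ordered : Prop := ∀ (ls : List (String × String)) (sep : String) (line_prefix : String), Dom_dict_ordered ls sep line_prefix → Pre_dict_ordered ls sep line_prefix → Spec_dict_ordered ls sep line_prefix (dict_ordered ls sep line_prefix)

-- ===== LEMMAS AND PROOFS =====

-- what A's loop appends after the head, as a recursion on the remaining elements
def tailRender (sepL lpL : List Char) : String → List (String × String) → List Char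
  | _, [] => []
  | pre, s :: rest =>
    (if s.1 == pre then ' ' :: pyReprPair s ++ [','] else sepL ++ lpL ++ pyReprPair s ++ [',']) ++
      tailRender sepL lpL s.1 rest

theorem foldl_step_eq (sepL lpL : List Char) :
    ∀ (rest : List (String × String)) (pre : String) (res : List Char),
      (rest.foldl (dictOrderedStep sepL lpL) (pre, res)).2 = res ++ tailRender sepL lpL pre rest := by
  intro rest
  induction rest with
  | nil => intro pre res; simp [tailRender]
  | cons s rest ih =>
    intro pre res
    simp only [List.foldl_cons, dictOrderedStep, tailRender]
    by_cases h : s.1 == pre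
    · simp [h, ih, List.append_assoc]
    · simp [h, ih, List.append_assoc]

theorem joinL_cons_flat (sep p : List Char) (ps : List (List Char)) :
    joinL sep (p :: ps) = p ++ (ps.map (fun q => sep ++ q)).flatten := by
  induction ps generalizing p with
  | nil => simp [joinL]
  | cons q qs ih => simp [joinL, ih q, List.append_assoc]

-- within one key group, every step takes the "same key" branch
theorem tailRender_group (sepL lpL : List Char) (k : String) :
    ∀ (vs : List String) (rest : List (String × String)),
      tailRender sepL lpL k (vs.map (fun v => (k, v)) ++ rest)
        = (vs.map (fun v => ' ' :: pyReprPair (k, v) ++ [','])).flatten ++ tailRender sepL lpL k rest := by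
  intro vs
  induction vs with
  | nil => intro rest; simp
  | cons v vt ih => intro rest; simp [tailRender, ih, List.append_assoc]

-- a key-grouped list, flattened
def flattenKV (kvs : List (String × List String)) : List (String × String) :=
  (kvs.map (fun q => q.2.map (fun v => (q.1, v)))).flatten

-- rendering the tail across groups with distinct adjacent keys
theorem tailRender_kvs (sepL lpL : List Char) :
    ∀ (kvs : List (String × List String)) (pre : String),
      (∀ q ∈ kvs, q.2 ≠ []) → (pre :: kvs.map Prod.fst).Pairwise (fun a b => a ≠ b) →
      tailRender sepL lpL pre (flattenKV kvs)
        = (kvs.map (fun q => sepL ++ lineB lpL q.1 q.2)).flatten := by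
  intro kvs
  induction kvs with
  | nil => intro pre _ _; simp [flattenKV, tailRender]
  | cons q kvt ih =>
    intro pre hne hch
    obtain ⟨k, vs⟩ := q
    rcases hvs : vs with _ | ⟨v, vt⟩
    · exact absurd hvs (hne (k, vs) (List.mem_cons_self))
    subst hvs
    rw [List.pairwise_cons] at hch
    have hkp : k ≠ pre := fun h => hch.1 k (by simp) h.symm
    have hch' : (k :: kvt.map Prod.fst).Pairwise (fun a b => a ≠ b) := hch.2
    show tailRender sepL lpL pre ((k, v) :: (vt.map (fun v => (k, v)) ++ flattenKV kvt)) = _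
    simp only [tailRender, beq_iff_eq, if_neg hkp]
    rw [tailRender_group, ih k (fun q hq => hne q (List.mem_cons_of_mem _ hq)) hch']
    simp [lineB, joinL_cons_flat, List.append_assoc, List.flatten_cons, List.map_map, Function.comp_def]

-- ---- the canonical (sorted) key/values decomposition ----
def keysOf (ls : List (String × String)) : List String :=
  PySem.List.sorted (PySem.Set.ofList (ls.map Prod.fst)) (fun k => k)

def valsOf (ls : List (String × String)) (k : String) : List String :=
  PySem.List.sorted ((ls.filter (fun p => p.1 == k)).map Prod.snd) (fun v => v)

def canonKV (ls : List (String × String)) : List (String × List String) :=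
  (keysOf ls).map (fun k => (k, valsOf ls k))

-- B's dict computes exactly the filtered values
theorem groupVals_getD (ls : List (String × String)) (k : String) :
    (groupVals ls).getD k [] = (ls.filter (fun p => p.1 == k)).map Prod.snd := by
  have main : ∀ (l : List (String × String)) (d : PySem.Dict String (List String)),
      (l.foldl (fun d p => d.insert p.1 (d.getD p.1 [] ++ [p.2])) d).getD k []
        = d.getD k [] ++ (l.filter (fun p => p.1 == k)).map Prod.snd := by
    intro l
    induction l with
    | nil => intro d; simp
    | cons p t ih =>
      intro d
      simp only [List.foldl_cons, ih, List.filter_cons]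
      by_cases h : p.1 = k
      · simp [PySem.Dict.getD_insert, h]
      · simp [PySem.Dict.getD_insert, h, Ne.symm h]
  simpa using main ls PySem.Dict.empty

theorem groupVals_keys (ls : List (String × String)) :
    (groupVals ls).keys = PySem.Set.ofList (ls.map Prod.fst) := by
  rw [show groupVals ls = ls.foldl (fun d p => d.insert p.1 (d.getD p.1 [] ++ [p.2])) PySem.Dict.empty from rfl,
    PySem.Dict.keys_foldl_insert_key ls Prod.fst (fun d p => d.getD p.1 [] ++ [p.2]),
    PySem.Set.ofList_eq_foldl]
  rfl

-- ---- sorted2 equals the canonical flattening ----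

-- the two-key comparator is the lexicographic strict order on pairs
theorem cmp_eq (p q : String × String) :
    (decide (p.1 < q.1) || (!decide (q.1 < p.1) && decide (p.2 < q.2)))
      = decide (toLex p < toLex q) := by
  rw [Bool.eq_iff_iff]
  simp only [Bool.or_eq_true, Bool.and_eq_true, Bool.not_eq_true', decide_eq_false_iff_not,
    decide_eq_true_eq, Prod.Lex.lt_iff, ofLex_toLex]
  constructor
  · rintro (h | ⟨h1, h2⟩)
    · exact Or.inl h
    · rcases lt_or_eq_of_le (le_of_not_gt h1) with h | h
      · exact Or.inl h
      · exact Or.inr ⟨h, h2⟩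
  · rintro (h | ⟨h1, h2⟩)
    · exact Or.inl h
    · exact Or.inr ⟨by rw [h1]; exact lt_irrefl _, h2⟩

theorem sorted2_eq_sortedLex (ls : List (String × String)) :
    PySem.List.sorted2 ls Prod.fst Prod.snd = PySem.List.sorted ls (fun p => toLex p) := by
  show ls.foldl (fun acc x => PySem.List.insertBy
      (fun a b => decide (a.1 < b.1) || (!decide (b.1 < a.1) && decide (a.2 < b.2))) x acc) []
    = ls.foldl (fun acc x => PySem.List.insertBy
      (fun a b => decide (toLex a < toLex b)) x acc) []
  have h : (fun (a b : String × String) => decide (a.1 < b.1) || (!decide (b.1 < a.1) && decide (a.2 < b.2)))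
      = fun a b => decide (toLex a < toLex b) := by
    funext a b; exact cmp_eq a b
  rw [h]

-- a nodup key list covering all first components splits a list into its per-key filters
theorem perm_filter_flatten :
    ∀ (ks : List String) (l : List (String × String)), ks.Nodup →
      (∀ p ∈ l, p.1 ∈ ks) →
      ((ks.map (fun k => l.filter (fun p => p.1 == k))).flatten).Perm l := by
  intro ks
  induction ks with
  | nil =>
    intro l _ hcov
    rcases l with _ | ⟨p, t⟩
    · simp
    · exact absurd (hcov p (List.mem_cons_self)) (List.not_mem_nil)
  | cons k kt ih =>
    intro l hnd hcov
    have hnd' := (List.nodup_cons.mp hnd).2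
    have hk := (List.nodup_cons.mp hnd).1
    set l' := l.filter (fun p => !(p.1 == k)) with hl'
    have hmaps : kt.map (fun k' => l.filter (fun p => p.1 == k'))
        = kt.map (fun k' => l'.filter (fun p => p.1 == k')) := by
      apply List.map_congr_left
      intro k' hk'
      have hkk : k' ≠ k := fun h => hk (h ▸ hk')
      rw [hl', List.filter_filter]
      apply List.filter_congr
      intro p _
      rw [Bool.eq_iff_iff]
      by_cases h : p.1 = k'
      · simp [h, hkk]
      · simp [h]
    have hcov' : ∀ p ∈ l', p.1 ∈ kt := by
      intro p hp
      have hm := List.mem_filter.mp hp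
      have := hcov p hm.1
      rcases List.mem_cons.mp this with h | h
      · exfalso
        have hf : (p.1 == k) = false := by simpa using hm.2
        rw [h] at hf
        simp at hf
      · exact h
    rw [List.map_cons, List.flatten_cons, hmaps]
    exact (((ih l' hnd' hcov')).append_left _).trans (List.filter_append_perm (fun p => p.1 == k) l)

theorem canon_perm (ls : List (String × String)) : (flattenKV (canonKV ls)).Perm ls := by
  have hnd : (keysOf ls).Nodup :=
    ((PySem.List.sorted_perm (PySem.Set.ofList (ls.map Prod.fst)) (fun k => k) false).nodup_iff).mpr
      (PySem.Set.nodup_ofList _)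
  have hcov : ∀ p ∈ ls, p.1 ∈ keysOf ls := by
    intro p hp
    rw [keysOf, PySem.List.mem_sorted, PySem.Set.mem_ofList]
    exact List.mem_map_of_mem hp
  have hgrp : ∀ k, ((valsOf ls k).map (fun v => (k, v))).Perm (ls.filter (fun p => p.1 == k)) := by
    intro k
    have h1 : (valsOf ls k).Perm ((ls.filter (fun p => p.1 == k)).map Prod.snd) :=
      PySem.List.sorted_perm _ _ false
    have h2 : ((ls.filter (fun p => p.1 == k)).map Prod.snd).map (fun v => (k, v))
        = ls.filter (fun p => p.1 == k) := by
      rw [List.map_map]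
      conv_rhs => rw [← List.map_id (ls.filter (fun p => p.1 == k))]
      apply List.map_congr_left
      intro p hp
      have hpk : p.1 = k := by simpa using (List.mem_filter.mp hp).2
      simp [Function.comp, Prod.ext_iff, hpk]
    exact h2 ▸ (h1.map (fun v => (k, v)))
  have hflat : ∀ ks : List String, (flattenKV (ks.map (fun k => (k, valsOf ls k)))).Perm
      ((ks.map (fun k => ls.filter (fun p => p.1 == k))).flatten) := by
    intro ks
    induction ks with
    | nil => simp [flattenKV]
    | cons k kt ih2 =>
      show ((valsOf ls k).map (fun v => (k, v)) ++ flattenKV (kt.map (fun k' => (k', valsOf ls k')))).Perm _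
      rw [List.map_cons, List.flatten_cons]
      exact (hgrp k).append ih2
  have hflat' := hflat (keysOf ls)
  rw [← canonKV] at hflat'
  exact hflat'.trans (perm_filter_flatten (keysOf ls) ls hnd hcov)

theorem canon_pairwise (ls : List (String × String)) :
    (flattenKV (canonKV ls)).Pairwise
      (fun a b => (fun p : String × String => toLex p) a ≤ (fun p : String × String => toLex p) b) := by
  rw [flattenKV, List.pairwise_flatten]
  constructor
  · intro l hl
    rw [canonKV, List.map_map] at hl
    obtain ⟨k, _, rfl⟩ := List.mem_map.mp hl
    simp only [Function.comp]
    rw [List.pairwise_map]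
    have := PySem.List.sorted_pairwise ((ls.filter (fun p => p.1 == k)).map Prod.snd) (fun v => v)
    refine this.imp ?_
    intro a b hab
    rw [Prod.Lex.le_iff]
    exact Or.inr ⟨rfl, hab⟩
  · rw [canonKV, List.map_map]
    rw [List.pairwise_map]
    have hk : (keysOf ls).Pairwise (fun a b => a < b) :=
      PySem.List.sorted_ofList_pairwise_lt (ls.map Prod.fst)
    refine hk.imp ?_
    intro k k' hkk x hx y hy
    simp only [Function.comp] at hx hy
    obtain ⟨_, _, rfl⟩ := List.mem_map.mp hx
    obtain ⟨_, _, rfl⟩ := List.mem_map.mp hy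
    rw [Prod.Lex.le_iff]
    exact Or.inl hkk

theorem sorted2_eq_canon (ls : List (String × String)) :
    PySem.List.sorted2 ls Prod.fst Prod.snd = flattenKV (canonKV ls) := by
  rw [sorted2_eq_sortedLex]
  exact PySem.List.eq_of_perm_of_pairwise_le_of_injective (fun p => toLex p)
    (fun a b h => h)
    ((PySem.List.sorted_perm ls (fun p => toLex p) false).trans (canon_perm ls).symm)
    (PySem.List.sorted_pairwise ls (fun p => toLex p))
    (canon_pairwise ls)

-- B as the canonical rendering
theorem alt_eq_canon (ls : List (String × String)) (sep line_prefix : String) :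
    dict_ordered_alt ls sep line_prefix
      = String.mk (joinL sep.toList ((canonKV ls).map (fun q => lineB line_prefix.toList q.1 q.2))) := by
  unfold dict_ordered_alt
  rw [groupVals_keys]
  congr 1
  congr 1
  rw [canonKV, List.map_map]
  apply List.map_congr_left
  intro k _
  simp [Function.comp, groupVals_getD, valsOf, keysOf]

theorem vals_ne_nil (ls : List (String × String)) (k : String) (hk : k ∈ keysOf ls) :
    valsOf ls k ≠ [] := by
  rw [keysOf, PySem.List.mem_sorted, PySem.Set.mem_ofList] at hk
  obtain ⟨p, hp, rfl⟩ := List.mem_map.mp hk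
  rw [valsOf, Ne, PySem.List.sorted_eq_nil_iff]
  simp only [List.map_eq_nil_iff]
  intro h
  have : p ∈ ls.filter (fun q => q.1 == p.1) := List.mem_filter.mpr ⟨hp, by simp⟩
  rw [h] at this
  exact List.not_mem_nil this

-- ===== VERDICT helpers done; main proofs =====
theorem dict_ordered_spec : Claim_equal_dict_ordered := by
  intro ls sep lp _ hpre
  unfold Spec_dict_ordered
  rw [alt_eq_canon]
  unfold dict_ordered
  rw [sorted2_eq_canon]
  have hkeys : keysOf ls ≠ [] := by
    rw [keysOf, Ne, PySem.List.sorted_eq_nil_iff]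
    intro h
    rcases ls with _ | ⟨p, t⟩
    · exact hpre rfl
    · have : p.1 ∈ PySem.Set.ofList ((p :: t).map Prod.fst) := by
        rw [PySem.Set.mem_ofList]; exact List.mem_map_of_mem (List.mem_cons_self)
      rw [h] at this
      exact List.not_mem_nil this
  rcases hks : keysOf ls with _ | ⟨k, kt⟩
  · exact absurd hks hkeys
  have hvk : valsOf ls k ≠ [] := vals_ne_nil ls k (by rw [hks]; exact List.mem_cons_self)
  rcases hvs : valsOf ls k with _ | ⟨v, vt⟩
  · exact absurd hvs hvk
  have hcanon : canonKV ls = (k, v :: vt) :: kt.map (fun k' => (k', valsOf ls k')) := by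
    rw [canonKV, hks, List.map_cons, hvs]
  rw [hcanon]
  have hflat : flattenKV ((k, v :: vt) :: kt.map (fun k' => (k', valsOf ls k')))
      = (k, v) :: (vt.map (fun v => (k, v)) ++ flattenKV (kt.map (fun k' => (k', valsOf ls k')))) := by
    simp [flattenKV]
  rw [hflat]
  -- A's fold over the canonical list (the match reduces on the cons)
  show String.mk ((List.map (fun v => (k, v)) vt ++ flattenKV (kt.map (fun k' => (k', valsOf ls k')))).foldl
      (dictOrderedStep sep.toList lp.toList) (k, lp.toList ++ pyReprPair (k, v) ++ [','])).2 = _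
  rw [foldl_step_eq]
  congr 1
  have hne : ∀ q ∈ kt.map (fun k' => (k', valsOf ls k')), q.2 ≠ [] := by
    intro q hq
    obtain ⟨k', hk', rfl⟩ := List.mem_map.mp hq
    exact vals_ne_nil ls k' (by rw [hks]; exact List.mem_cons_of_mem _ hk')
  have hch : (k :: (kt.map (fun k' => (k', valsOf ls k'))).map Prod.fst).Pairwise (fun a b => a ≠ b) := by
    have : (kt.map (fun k' => (k', valsOf ls k'))).map Prod.fst = kt := by
      rw [List.map_map]; simp [Function.comp_def]
    rw [this]
    have hk : (keysOf ls).Pairwise (fun a b => a < b) :=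
      PySem.List.sorted_ofList_pairwise_lt (ls.map Prod.fst)
    rw [hks] at hk
    exact hk.imp (fun h => ne_of_lt h)
  rw [tailRender_group, tailRender_kvs _ _ _ k hne hch]
  rw [List.map_cons, joinL_cons_flat]
  simp [lineB, joinL_cons_flat, List.append_assoc, List.map_map, Function.comp_def]
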